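-- pv_equiv track=rewrite | github.com/EdinburghNLP/ACES | challenge_set_annotation/debugging_utilities.py | is_word_level
-- ===== SOURCE A (Python) =====
-- def is_word_level(g_spans, b_spans, change):
--     g_starts = [span[0] for span in g_spans]
--     b_starts = [span[0] for span in b_spans]
--     g_ends = [span[1] for span in g_spans]
--     b_ends = [span[1] for span in b_spans]
--     for c in change:
--         if "in_good" in c and c["in_good"] != None:
--             if c["in_good"]["character_span"][0] not in g_starts or c["in_good"]["character_span"][1] not in g_ends:
--                 return False
--         if "in_bad" in c and c["in_bad"] != None:
--             if c["in_bad"]["character_span"][0] not in b_starts or c["in_bad"]["character_span"][1] not in b_ends: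
--                 return False
--     return True
-- ===== SOURCE B (Python) =====
-- def is_word_level(g_spans, b_spans, change):
--     # collect the required boundary values in one pass, then do four bulk subset checks
--     req_gs, req_ge, req_bs, req_be = set(), set(), set(), set()
--     for c in change:
--         g = c.get("in_good")
--         if g is not None:
--             sp = g["character_span"]
--             req_gs.add(sp[0])
--             req_ge.add(sp[1])
--         b = c.get("in_bad")
--         if b is not None:
--             sp = b["character_span"]
--             req_bs.add(sp[0])
--             req_be.add(sp[1])
--     gs = {s for s, _ in g_spans}
--     ge = {e for _, e in g_spans}
--     bs = {s for s, _ in b_spans}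
--     be = {e for _, e in b_spans}
--     return req_gs <= gs and req_ge <= ge and req_bs <= bs and req_be <= be
-- ===== Notes on version B (the rewrite author's own statement) =====
-- stated objective: alternative
-- what changed: Replaces A's early-exit per-item loop with four per-item list membership tests by a collect-then-check scheme: one pass gathers the required start/end values into sets, then four bulk subset tests against the span-boundary sets decide the result.
import Mathlib
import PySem

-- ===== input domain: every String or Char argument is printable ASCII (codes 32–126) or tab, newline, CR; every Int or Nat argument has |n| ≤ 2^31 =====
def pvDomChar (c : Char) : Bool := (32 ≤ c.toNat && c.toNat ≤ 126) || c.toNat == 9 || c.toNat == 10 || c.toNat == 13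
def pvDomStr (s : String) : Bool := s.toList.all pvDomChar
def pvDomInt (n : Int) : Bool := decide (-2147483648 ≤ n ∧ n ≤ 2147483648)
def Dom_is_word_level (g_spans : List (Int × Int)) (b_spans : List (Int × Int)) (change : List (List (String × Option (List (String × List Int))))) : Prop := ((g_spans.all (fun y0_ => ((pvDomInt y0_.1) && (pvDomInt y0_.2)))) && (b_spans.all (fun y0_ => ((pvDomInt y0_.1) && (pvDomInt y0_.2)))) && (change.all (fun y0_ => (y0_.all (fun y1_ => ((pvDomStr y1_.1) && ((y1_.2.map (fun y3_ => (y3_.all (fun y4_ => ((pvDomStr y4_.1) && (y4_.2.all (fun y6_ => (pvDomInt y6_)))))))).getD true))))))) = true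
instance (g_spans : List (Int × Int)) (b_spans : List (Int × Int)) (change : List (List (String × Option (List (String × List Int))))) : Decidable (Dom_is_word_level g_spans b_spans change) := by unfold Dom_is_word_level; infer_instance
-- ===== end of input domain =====

-- B does a single collect pass building four requirement sets and then four bulk subset
-- checks, instead of A's early-exit per-item loop with list membership tests (alternative decomposition).
-- Pre_ excludes inputs where some change item's in_good/in_bad dict lacks a "character_span" list
-- of length ≥ 2: there Python A raises KeyError/IndexError (or, if an earlier item already failed,
-- returns False while B's full collect pass still raises).

-- ===== PORT A =====
-- exact model of looking up key k in a Python dict built from the association list (the value of the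
-- LAST occurrence of a duplicate key wins, as in Python's dict construction); none = key absent
def pvLookup {α : Type} (k : String) : List (String × α) → Option α
  | [] => none
  | (k', v) :: rest =>
    match pvLookup k rest with
    | some w => some w
    | none => if k' == k then some v else none

-- A's per-item check: true = the 'return False' branch fires ("span boundary missing").
-- On a malformed item (missing key / short list, where Python raises) it returns false; such inputs are outside Pre_.
def pvCheckSide (starts ends : List Int) (o : Option (Option (List (String × List Int)))) : Bool :=
  match o with
  | some (some d) =>
    match pvLookup "character_span" d with
    | some sp =>
      match PySem.List.pyGet? sp 0, PySem.List.pyGet? sp 1 with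
      | some s, some e => !(starts.contains s) || !(ends.contains e)
      | _, _ => false
    | none => false
  | _ => false

def pvLoopA (g_starts b_starts g_ends b_ends : List Int) : List (List (String × Option (List (String × List Int)))) → Bool
  | [] => true
  | c :: rest =>
    if pvCheckSide g_starts g_ends (pvLookup "in_good" c) then false
    else if pvCheckSide b_starts b_ends (pvLookup "in_bad" c) then false
    else pvLoopA g_starts b_starts g_ends b_ends rest

def is_word_level (g_spans : List (Int × Int)) (b_spans : List (Int × Int)) (change : List (List (String × Option (List (String × List Int))))) : Bool :=
  let g_starts := g_spans.map (fun span => span.1)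
  let b_starts := b_spans.map (fun span => span.1)
  let g_ends := g_spans.map (fun span => span.2)
  let b_ends := b_spans.map (fun span => span.2)
  pvLoopA g_starts b_starts g_ends b_ends change

-- ===== PORT B =====
-- B's extraction of the required (start, end) pair from c.get("in_good")/c.get("in_bad");
-- none both for 'absent/None' and for the malformed shapes excluded by Pre_ (where Python B raises).
def pvExtract (o : Option (Option (List (String × List Int)))) : Option (Int × Int) :=
  match o with
  | some (some d) =>
    match pvLookup "character_span" d with
    | some sp =>
      match PySem.List.pyGet? sp 0, PySem.List.pyGet? sp 1 with
      | some s, some e => some (s, e)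
      | _, _ => none
    | none => none
  | _ => none

def pvStepB (q : PySem.Set Int × PySem.Set Int × PySem.Set Int × PySem.Set Int)
    (c : List (String × Option (List (String × List Int)))) :
    PySem.Set Int × PySem.Set Int × PySem.Set Int × PySem.Set Int :=
  let q1 := match pvExtract (pvLookup "in_good" c) with
    | some (s, e) => (PySem.Set.add q.1 s, PySem.Set.add q.2.1 e, q.2.2.1, q.2.2.2)
    | none => q
  match pvExtract (pvLookup "in_bad" c) with
  | some (s, e) => (q1.1, q1.2.1, PySem.Set.add q1.2.2.1 s, PySem.Set.add q1.2.2.2 e)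
  | none => q1

def is_word_level_alt (g_spans : List (Int × Int)) (b_spans : List (Int × Int)) (change : List (List (String × Option (List (String × List Int))))) : Bool :=
  let req := change.foldl pvStepB (PySem.Set.empty, PySem.Set.empty, PySem.Set.empty, PySem.Set.empty)
  let gs := PySem.Set.ofList (g_spans.map (fun p => p.1))
  let ge := PySem.Set.ofList (g_spans.map (fun p => p.2))
  let bs := PySem.Set.ofList (b_spans.map (fun p => p.1))
  let be := PySem.Set.ofList (b_spans.map (fun p => p.2))
  PySem.Set.issubset req.1 gs && PySem.Set.issubset req.2.1 ge &&
  PySem.Set.issubset req.2.2.1 bs && PySem.Set.issubset req.2.2.2 be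

-- ===== PRECONDITION & SPEC =====
-- Well-shapedness of one side of one change item: if present and not None, the dict must
-- carry a "character_span" list with at least two elements (else the Python programs raise).
def pvSpanOK (o : Option (Option (List (String × List Int)))) : Bool :=
  match o with
  | some (some d) =>
    match pvLookup "character_span" d with
    | some sp => decide (2 ≤ sp.length)
    | none => false
  | _ => true

-- Pre_ excludes change items whose in_good/in_bad lacks a "character_span" list of length ≥ 2:
-- on those Python A raises KeyError/IndexError — or returns False only when an earlier item already
-- failed, while B's collect pass over ALL items still raises.
def Pre_is_word_level (g_spans : List (Int × Int)) (b_spans : List (Int × Int)) (change : List (List (String × Option (List (String × List Int))))) : Prop :=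
  ∀ c ∈ change, pvSpanOK (pvLookup "in_good" c) = true ∧ pvSpanOK (pvLookup "in_bad" c) = true
instance (g_spans : List (Int × Int)) (b_spans : List (Int × Int)) (change : List (List (String × Option (List (String × List Int))))) : Decidable (Pre_is_word_level g_spans b_spans change) := by unfold Pre_is_word_level; infer_instance

def pvWitness_is_word_level : (List (Int × Int)) × (List (Int × Int)) × (List (List (String × Option (List (String × List Int))))) :=
  ([(0, 3)], [(1, 4)], [[("in_good", some [("character_span", [0, 3])]), ("in_bad", some [("character_span", [1, 4])])], [("in_good", none)]])

def Spec_is_word_level (g_spans : List (Int × Int)) (b_spans : List (Int × Int)) (change : List (List (String × Option (List (String × List Int))))) (out : Bool) : Prop := out = is_word_level_alt g_spans b_spans change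
instance (g_spans : List (Int × Int)) (b_spans : List (Int × Int)) (change : List (List (String × Option (List (String × List Int))))) (out : Bool) : Decidable (Spec_is_word_level g_spans b_spans change out) := by unfold Spec_is_word_level; infer_instance

-- ===== CLAIM (what is proved, stated in full; the proofs are below) =====
def Claim_equal_is_word_level : Prop := ∀ (g_spans : List (Int × Int)) (b_spans : List (Int × Int)) (change : List (List (String × Option (List (String × List Int))))), Dom_is_word_level g_spans b_spans change → Pre_is_word_level g_spans b_spans change → Spec_is_word_level g_spans b_spans change (is_word_level g_spans b_spans change)

-- ===== LEMMAS AND PROOFS =====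

-- per-item requirement, shared vocabulary of both characterisations
def pvReqOK (starts ends : List Int) (o : Option (Option (List (String × List Int)))) : Prop :=
  ∀ s e, pvExtract o = some (s, e) → s ∈ starts ∧ e ∈ ends

theorem pvCheckSide_false_iff (starts ends : List Int) (o : Option (Option (List (String × List Int)))) :
    pvCheckSide starts ends o = false ↔ pvReqOK starts ends o := by
  unfold pvCheckSide pvReqOK pvExtract
  rcases o with _ | (_ | d)
  · simp
  · simp
  · rcases h : pvLookup "character_span" d with _ | sp
    · simp only [h]; simp
    · simp only [h]
      rcases h0 : PySem.List.pyGet? sp 0 with _ | s <;>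
        rcases h1 : PySem.List.pyGet? sp 1 with _ | e <;>
          simp only [h0, h1] <;> simp <;> try tauto

theorem pvLoopA_true_iff (gs bs ge be : List Int) (change : List (List (String × Option (List (String × List Int))))) :
    pvLoopA gs bs ge be change = true ↔
      ∀ c ∈ change, pvReqOK gs ge (pvLookup "in_good" c) ∧ pvReqOK bs be (pvLookup "in_bad" c) := by
  induction change with
  | nil => simp [pvLoopA]
  | cons c rest ih =>
    unfold pvLoopA
    by_cases hg : pvCheckSide gs ge (pvLookup "in_good" c) = true
    · simp only [hg, if_true]
      constructor
      · intro h; cases h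
      · intro h
        have := (pvCheckSide_false_iff gs ge (pvLookup "in_good" c)).mpr (h c (by simp)).1
        rw [this] at hg; cases hg
    · rw [Bool.not_eq_true] at hg
      by_cases hb : pvCheckSide bs be (pvLookup "in_bad" c) = true
      · simp only [hg, hb, Bool.false_eq_true, if_false, if_true]
        constructor
        · intro h; cases h
        · intro h
          have := (pvCheckSide_false_iff bs be (pvLookup "in_bad" c)).mpr (h c (by simp)).2
          rw [this] at hb; cases hb
      · rw [Bool.not_eq_true] at hb
        simp only [hg, hb, Bool.false_eq_true, if_false, ih]
        constructor
        · intro h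
          intro x hx
          rcases List.mem_cons.mp hx with rfl | hx'
          · exact ⟨(pvCheckSide_false_iff _ _ _).mp hg, (pvCheckSide_false_iff _ _ _).mp hb⟩
          · exact h x hx'
        · intro h x hx; exact h x (List.mem_cons_of_mem _ hx)

-- subset property of a quadruple of requirement sets
def pvSubP (gs ge bs be : List Int) (q : PySem.Set Int × PySem.Set Int × PySem.Set Int × PySem.Set Int) : Prop :=
  (∀ x ∈ q.1, x ∈ gs) ∧ (∀ x ∈ q.2.1, x ∈ ge) ∧ (∀ x ∈ q.2.2.1, x ∈ bs) ∧ (∀ x ∈ q.2.2.2, x ∈ be)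

theorem pvMemAddForall (q : PySem.Set Int) (a : Int) (L : List Int) :
    (∀ x ∈ PySem.Set.add q a, x ∈ L) ↔ ((∀ x ∈ q, x ∈ L) ∧ a ∈ L) := by
  simp only [PySem.Set.mem_add]
  constructor
  · intro h; exact ⟨fun x hx => h x (Or.inl hx), h a (Or.inr rfl)⟩
  · rintro ⟨h1, h2⟩ x (hx | rfl)
    · exact h1 x hx
    · exact h2

theorem pvReqOK_none (st en : List Int) (o : Option (Option (List (String × List Int))))
    (h : pvExtract o = none) : pvReqOK st en o := by
  intro s e hse; rw [h] at hse; cases hse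

theorem pvReqOK_some_iff (st en : List Int) {o : Option (Option (List (String × List Int)))} {s e : Int}
    (h : pvExtract o = some (s, e)) : pvReqOK st en o ↔ (s ∈ st ∧ e ∈ en) := by
  constructor
  · intro k; exact k s e h
  · rintro ⟨hs, he⟩ a b hab
    rw [h] at hab
    simp only [Option.some.injEq, Prod.mk.injEq] at hab
    obtain ⟨rfl, rfl⟩ := hab
    exact ⟨hs, he⟩

theorem pvSubP_step (gs ge bs be : List Int) (q : PySem.Set Int × PySem.Set Int × PySem.Set Int × PySem.Set Int)
    (c : List (String × Option (List (String × List Int)))) :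
    pvSubP gs ge bs be (pvStepB q c) ↔
      pvSubP gs ge bs be q ∧ pvReqOK gs ge (pvLookup "in_good" c) ∧ pvReqOK bs be (pvLookup "in_bad" c) := by
  obtain ⟨q1, q2, q3, q4⟩ := q
  rcases hgd : pvExtract (pvLookup "in_good" c) with _ | ⟨s, e⟩ <;>
    rcases hbd : pvExtract (pvLookup "in_bad" c) with _ | ⟨s', e'⟩
  · have h1 := pvReqOK_none gs ge _ hgd
    have h2 := pvReqOK_none bs be _ hbd
    simp only [pvStepB, hgd, hbd]
    tauto
  · have h1 := pvReqOK_none gs ge _ hgd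
    rw [pvReqOK_some_iff bs be hbd]
    simp only [pvStepB, hgd, hbd, pvSubP, pvMemAddForall]
    tauto
  · have h2 := pvReqOK_none bs be _ hbd
    rw [pvReqOK_some_iff gs ge hgd]
    simp only [pvStepB, hgd, hbd, pvSubP, pvMemAddForall]
    tauto
  · rw [pvReqOK_some_iff gs ge hgd, pvReqOK_some_iff bs be hbd]
    simp only [pvStepB, hgd, hbd, pvSubP, pvMemAddForall]
    tauto

theorem pvSubP_foldl (gs ge bs be : List Int) (change : List (List (String × Option (List (String × List Int)))))
    (q : PySem.Set Int × PySem.Set Int × PySem.Set Int × PySem.Set Int) :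
    pvSubP gs ge bs be (change.foldl pvStepB q) ↔
      pvSubP gs ge bs be q ∧
        ∀ c ∈ change, pvReqOK gs ge (pvLookup "in_good" c) ∧ pvReqOK bs be (pvLookup "in_bad" c) := by
  induction change generalizing q with
  | nil => simp
  | cons c rest ih =>
    simp only [List.foldl_cons, ih, pvSubP_step, List.mem_cons]
    constructor
    · rintro ⟨⟨hq, hg, hb⟩, hrest⟩
      exact ⟨hq, fun x hx => by rcases hx with rfl | hx; exacts [⟨hg, hb⟩, hrest x hx]⟩
    · rintro ⟨hq, hall⟩
      exact ⟨⟨hq, hall c (Or.inl rfl)⟩, fun x hx => hall x (Or.inr hx)⟩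

theorem is_word_level_alt_true_iff (g_spans b_spans : List (Int × Int)) (change : List (List (String × Option (List (String × List Int))))) :
    is_word_level_alt g_spans b_spans change = true ↔
      ∀ c ∈ change, pvReqOK (g_spans.map (fun p => p.1)) (g_spans.map (fun p => p.2)) (pvLookup "in_good" c) ∧
        pvReqOK (b_spans.map (fun p => p.1)) (b_spans.map (fun p => p.2)) (pvLookup "in_bad" c) := by
  unfold is_word_level_alt
  simp only [Bool.and_eq_true, PySem.Set.issubset_iff, PySem.Set.mem_ofList]
  constructor
  · rintro ⟨⟨⟨h1, h2⟩, h3⟩, h4⟩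
    exact ((pvSubP_foldl _ _ _ _ change _).mp ⟨h1, h2, h3, h4⟩).2
  · intro h
    obtain ⟨k1, k2, k3, k4⟩ :=
      (pvSubP_foldl (g_spans.map (fun p => p.1)) (g_spans.map (fun p => p.2))
        (b_spans.map (fun p => p.1)) (b_spans.map (fun p => p.2)) change
        (PySem.Set.empty, PySem.Set.empty, PySem.Set.empty, PySem.Set.empty)).mpr
        ⟨⟨by simp [PySem.Set.empty], by simp [PySem.Set.empty], by simp [PySem.Set.empty], by simp [PySem.Set.empty]⟩, h⟩
    exact ⟨⟨⟨k1, k2⟩, k3⟩, k4⟩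

-- ===== VERDICT (by name: the statement is the Claim_ definition above) =====
theorem is_word_level_spec : Claim_equal_is_word_level := by
  intro g_spans b_spans change _ _
  unfold Spec_is_word_level
  rw [Bool.eq_iff_iff]
  unfold is_word_level
  rw [pvLoopA_true_iff, is_word_level_alt_true_iff]
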